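-- pv_equiv track=rewrite | github.com/sanghyukmoon/fiso | setups/shearing_box.py | calc_leaf
-- ===== SOURCE A (Python) =====
-- def find_split(iso,eic_dict):
--     # find the point where objects split
--     eics = eic_dict[iso]
--     le = len(eics)
--     if le == 0:
--         return iso
--     elif le == 1:
--         return find_split(eics[0],eic_dict)
--     else:
--         return iso
--
-- def calc_leaf(iso_dict,iso_list,eic_list):
--     # calculate leaf from full
--     leaf_dict = {}
--     eic_dict = dict(zip(iso_list,eic_list))
--
--     # find split dict
--     fsd = {}
--     for iso in iso_list:
--         if iso not in iso_dict:
--             continue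
--         split = find_split(iso,eic_dict)
--         if split in fsd:
--             fsd[split].append(iso)
--         else:
--             fsd[split] = [split]
--     for split in fsd:
--         if len(eic_dict[split]) == 0:
--             leaf_dict[split] = []
--             for subiso in fsd[split]:
--                 if subiso in iso_dict:
--                     leaf_dict[split] += iso_dict[subiso]
--     return leaf_dict
-- ===== SOURCE B (Python) =====
-- def calc_leaf(iso_dict, iso_list, eic_list):
--     # calculate leaf from full: one memoized (path-compressed) walk per iso,
--     # pairs (split, iso) collected in a flat list, then grouped and rendered.
--     eic = dict(zip(iso_list, eic_list))
--     cache = {}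
--     pairs = []
--     for iso in iso_list:
--         if iso not in iso_dict:
--             continue
--         path, cur = [], iso
--         while cur not in cache and len(eic[cur]) == 1:
--             path.append(cur)
--             cur = eic[cur][0]
--         s = cache.get(cur, cur)
--         for p in path:
--             cache[p] = s
--         pairs.append((s, iso))
--     groups = {}
--     for s, iso in pairs:
--         groups.setdefault(s, []).append(iso)
--     return {s: iso_dict.get(s, []) + [c for i in members[1:] for c in iso_dict[i]]
--             for s, members in groups.items() if len(eic[s]) == 0}
-- ===== Notes on version B (the rewrite author's own statement) =====
-- stated objective: alternative
-- what changed: B replaces A's per-iso recursive re-walk of the single-child chain by one iterative walk with a memo cache (path compression), collects flat (split, iso) pairs and groups them in a separate pass, and renders the leaf dict by a filtered comprehension (iso_dict.get(s,[]) + members[1:]) instead of A's sentinel-first member lists and in-place += mutation.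
import Mathlib
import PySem

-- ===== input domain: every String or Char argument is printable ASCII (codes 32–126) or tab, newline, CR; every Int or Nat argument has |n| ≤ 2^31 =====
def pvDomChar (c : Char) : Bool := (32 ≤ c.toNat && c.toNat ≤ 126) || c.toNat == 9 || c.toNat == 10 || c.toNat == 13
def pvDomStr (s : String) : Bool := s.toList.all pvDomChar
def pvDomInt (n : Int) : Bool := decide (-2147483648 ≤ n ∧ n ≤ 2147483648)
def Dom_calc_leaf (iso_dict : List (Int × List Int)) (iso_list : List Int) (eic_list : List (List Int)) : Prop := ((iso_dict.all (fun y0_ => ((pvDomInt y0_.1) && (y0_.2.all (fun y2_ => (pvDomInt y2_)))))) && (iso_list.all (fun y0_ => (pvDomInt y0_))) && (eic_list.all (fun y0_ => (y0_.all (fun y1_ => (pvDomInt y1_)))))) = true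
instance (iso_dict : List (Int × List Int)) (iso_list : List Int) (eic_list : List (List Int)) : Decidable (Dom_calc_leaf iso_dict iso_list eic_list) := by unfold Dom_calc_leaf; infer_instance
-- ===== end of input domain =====

-- B resolves each split chain once, iteratively with a memo cache (path compression), collects
-- flat (split, iso) pairs and groups them afterwards, instead of A's per-iso recursive re-walk
-- and in-place grouped-dict mutation; equivalence is proved wherever A returns (Pre_).

-- ===== PORT A =====
-- find_split: Python's recursion carries no fuel; the port takes explicit fuel and returns none
-- on fuel exhaustion or a missing key (KeyError).  Under Pre_ fuel iso_list.length + 1 suffices.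
def findSplit (fuel : Nat) (eic_dict : PySem.Dict Int (List Int)) (iso : Int) : Option Int :=
  match fuel with
  | 0 => none
  | f + 1 =>
    match eic_dict.get? iso with
    | none => none
    | some eics =>
      if eics.length = 0 then some iso
      else if eics.length = 1 then findSplit f eic_dict (PySem.List.pyGetD eics 0 0)
      else some iso

def calc_leaf (iso_dict : List (Int × List Int)) (iso_list : List Int) (eic_list : List (List Int)) : List (Int × List Int) :=
  let eic_dict := PySem.Dict.ofList (iso_list.zip eic_list)
  let fsd := iso_list.foldl (fun (fsd : PySem.Dict Int (List Int)) iso =>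
    if (iso_dict.lookup iso).isSome then
      match findSplit (iso_list.length + 1) eic_dict iso with
      | none => fsd            -- unreachable under Pre_ (there Python raises instead)
      | some split =>
        if fsd.contains split then fsd.modify split [] (fun l => l ++ [iso])
        else fsd.insert split [split]
    else fsd) PySem.Dict.empty
  let leaf_dict := fsd.keys.foldl (fun (ld : PySem.Dict Int (List Int)) split =>
    if (eic_dict.getD split []).length = 0 then
      (fsd.getD split []).foldl (fun ld subiso =>
        if (iso_dict.lookup subiso).isSome then
          ld.modify split [] (fun l => l ++ (iso_dict.lookup subiso).getD [])
        else ld) (ld.insert split [])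
    else ld) PySem.Dict.empty
  leaf_dict.items

-- ===== PORT B =====
-- the while-loop of Source B, with explicit fuel (none = missing key / fuel out; unreachable under Pre_)
def walkSplit (fuel : Nat) (eic_dict : PySem.Dict Int (List Int)) (cache : PySem.Dict Int Int)
    (path : List Int) (cur : Int) : Option (Int × List Int) :=
  match fuel with
  | 0 => none
  | f + 1 =>
    if cache.contains cur then some (cache.getD cur cur, path)
    else
      match eic_dict.get? cur with
      | none => none
      | some eics =>
        if eics.length = 1 then walkSplit f eic_dict cache (path ++ [cur]) (PySem.List.pyGetD eics 0 0)
        else some (cur, path)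

-- members[1:] in Source B indexes only isos that were checked to be iso_dict keys, so its
-- iso_dict[i] never raises; the port reads it with getD [].
def calc_leaf_alt (iso_dict : List (Int × List Int)) (iso_list : List Int) (eic_list : List (List Int)) : List (Int × List Int) :=
  let eic := PySem.Dict.ofList (iso_list.zip eic_list)
  let st := iso_list.foldl (fun (st : PySem.Dict Int Int × List (Int × Int)) iso =>
    if (iso_dict.lookup iso).isSome then
      match walkSplit (iso_list.length + 1) eic st.1 [] iso with
      | none => st
      | some (s, path) => (path.foldl (fun c p => c.insert p s) st.1, st.2 ++ [(s, iso)])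
    else st) (PySem.Dict.empty, [])
  let groups := st.2.foldl (fun (g : PySem.Dict Int (List Int)) p =>
    g.modify p.1 [] (fun l => l ++ [p.2])) PySem.Dict.empty
  (groups.items.filter (fun p => (eic.getD p.1 []).length == 0)).map
    (fun p => (p.1, (iso_dict.lookup p.1).getD [] ++
      (p.2.drop 1).flatMap (fun i => (iso_dict.lookup i).getD [])))

-- ===== PRECONDITION & SPEC =====
-- chainEnds: the single-child chain starting at k reaches, within the given number of steps, a
-- node with zero or several children (staying inside the eic keys).
def chainEnds (eic : PySem.Dict Int (List Int)) : Nat → Int → Bool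
  | 0, _ => false
  | n + 1, k =>
    match eic.get? k with
    | none => false
    | some eics => if eics.length = 1 then chainEnds eic n (PySem.List.pyGetD eics 0 0) else true

-- Pre_ excludes exactly the inputs on which A raises: a processed iso whose single-child chain
-- hits a missing eic key (KeyError) or never reaches a terminal node, i.e. cycles (infinite
-- recursion).  A terminating chain visits pairwise distinct keys, so by pigeonhole the step
-- budget iso_list.length + 1 is exact, not a size restriction; on every input where A returns,
-- Pre_ holds.
def Pre_calc_leaf (iso_dict : List (Int × List Int)) (iso_list : List Int) (eic_list : List (List Int)) : Prop :=
  ∀ iso ∈ iso_list, (iso_dict.lookup iso).isSome = true →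
    chainEnds (PySem.Dict.ofList (iso_list.zip eic_list)) (iso_list.length + 1) iso = true
instance (iso_dict : List (Int × List Int)) (iso_list : List Int) (eic_list : List (List Int)) : Decidable (Pre_calc_leaf iso_dict iso_list eic_list) := by unfold Pre_calc_leaf; infer_instance

def pvWitness_calc_leaf : (List (Int × List Int)) × List Int × List (List Int) :=
  ([(3, [10]), (1, [20, 21]), (2, [30])], [3, 2, 1], [[1], [], []])

def Spec_calc_leaf (iso_dict : List (Int × List Int)) (iso_list : List Int) (eic_list : List (List Int)) (out : List (Int × List Int)) : Prop := out = calc_leaf_alt iso_dict iso_list eic_list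
instance (iso_dict : List (Int × List Int)) (iso_list : List Int) (eic_list : List (List Int)) (out : List (Int × List Int)) : Decidable (Spec_calc_leaf iso_dict iso_list eic_list out) := by unfold Spec_calc_leaf; infer_instance

-- ===== CLAIM (what is proved, stated in full; the proofs are below) =====
def Claim_equal_calc_leaf : Prop := ∀ (iso_dict : List (Int × List Int)) (iso_list : List Int) (eic_list : List (List Int)), Dom_calc_leaf iso_dict iso_list eic_list → Pre_calc_leaf iso_dict iso_list eic_list → Spec_calc_leaf iso_dict iso_list eic_list (calc_leaf iso_dict iso_list eic_list)

-- ===== LEMMAS AND PROOFS =====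

theorem findSplit_mono (eic : PySem.Dict Int (List Int)) :
    ∀ (f f' : Nat) (k s : Int), f ≤ f' → findSplit f eic k = some s → findSplit f' eic k = some s := by
  intro f
  induction f with
  | zero => intro f' k s _ h; simp [findSplit] at h
  | succ f ih =>
    intro f' k s hle h
    obtain ⟨f'', rfl⟩ : ∃ g, f' = g + 1 := ⟨f' - 1, by omega⟩
    rw [findSplit] at h ⊢
    cases hg : eic.get? k with
    | none => rw [hg] at h; exact absurd h (by simp)
    | some eics =>
      rw [hg] at h
      dsimp only at h ⊢
      split_ifs at h ⊢ with h0 h1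
      · exact h
      · exact ih f'' _ s (by omega) h
      · exact h

theorem chainEnds_findSplit (eic : PySem.Dict Int (List Int)) :
    ∀ (f : Nat) (k : Int), chainEnds eic f k = true → ∃ s, findSplit f eic k = some s := by
  intro f
  induction f with
  | zero => intro k h; simp [chainEnds] at h
  | succ f ih =>
    intro k h
    rw [chainEnds] at h
    rw [findSplit]
    cases hg : eic.get? k with
    | none => rw [hg] at h; exact absurd h (by simp)
    | some eics =>
      rw [hg] at h
      dsimp only at h ⊢
      by_cases h0 : eics.length = 0
      · rw [if_pos h0]; exact ⟨k, rfl⟩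
      · rw [if_neg h0]
        by_cases h1 : eics.length = 1
        · rw [if_pos h1]; rw [if_pos h1] at h; exact ih _ h
        · rw [if_neg h1]; exact ⟨k, rfl⟩

theorem walkSplit_spec (eic : PySem.Dict Int (List Int)) (N : Nat) :
    ∀ (f : Nat), f ≤ N → ∀ (cache : PySem.Dict Int Int) (path : List Int) (cur s : Int),
    (∀ k w, cache.get? k = some w → findSplit N eic k = some w) →
    findSplit f eic cur = some s →
    ∃ tail, walkSplit f eic cache path cur = some (s, path ++ tail) ∧
      ∀ p ∈ tail, findSplit N eic p = some s := by
  intro f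
  induction f with
  | zero => intro _ cache path cur s _ h; simp [findSplit] at h
  | succ f ih =>
    intro hle cache path cur s hinv h
    rw [findSplit] at h
    cases hg : eic.get? cur with
    | none => rw [hg] at h; exact absurd h (by simp)
    | some eics =>
      rw [hg] at h
      rw [walkSplit]
      by_cases hc : cache.contains cur = true
      · have hc' := hc
        rw [PySem.Dict.contains_eq_isSome_get?] at hc'
        cases hv : cache.get? cur with
        | none => rw [hv] at hc'; simp at hc'
        | some v =>
          have hFS : findSplit N eic cur = some v := hinv _ _ hv
          have hFS' : findSplit N eic cur = some s := by
            apply findSplit_mono eic (f+1) N _ _ hle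
            rw [findSplit, hg]; exact h
          have hvs : v = s := by rw [hFS] at hFS'; exact Option.some.inj hFS'
          refine ⟨[], ?_, by simp⟩
          rw [hc, if_pos rfl]
          simp [PySem.Dict.getD_eq_get?_getD, hv, hvs]
      · rw [if_neg hc, hg]
        dsimp only at h ⊢
        by_cases h0 : eics.length = 0
        · rw [if_pos h0] at h
          rw [if_neg (by omega)]
          exact ⟨[], by simpa using h, by simp⟩
        · rw [if_neg h0] at h
          by_cases h1 : eics.length = 1
          · rw [if_pos h1] at h
            rw [if_pos h1]
            obtain ⟨tail', htail', hprop⟩ := ih (by omega) cache (path ++ [cur]) _ s hinv h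
            refine ⟨cur :: tail', ?_, ?_⟩
            · rw [htail']; simp
            · intro p hp
              rcases List.mem_cons.mp hp with rfl | hp
              · obtain ⟨N', rfl⟩ : ∃ g, N = g + 1 := ⟨N - 1, by omega⟩
                rw [findSplit, hg]
                dsimp only
                rw [if_neg h0, if_pos h1]
                exact findSplit_mono eic f N' _ s (by omega) h
              · exact hprop p hp
          · rw [if_neg h1] at h
            rw [if_neg h1]
            exact ⟨[], by simpa using h, by simp⟩

theorem cache_invariant_insert (eic : PySem.Dict Int (List Int)) (N : Nat) (s : Int) :
    ∀ (tail : List Int) (cache : PySem.Dict Int Int),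
    (∀ k w, cache.get? k = some w → findSplit N eic k = some w) →
    (∀ p ∈ tail, findSplit N eic p = some s) →
    ∀ k w, (tail.foldl (fun c p => c.insert p s) cache).get? k = some w → findSplit N eic k = some w := by
  intro tail
  induction tail with
  | nil => intro cache hinv _ k w h; exact hinv k w h
  | cons p t ih =>
    intro cache hinv hprop k w h
    refine ih _ ?_ (fun q hq => hprop q (List.mem_cons_of_mem _ hq)) k w h
    intro k' w' h'
    by_cases hk : k' = p
    · subst hk
      rw [PySem.Dict.get?_insert_self] at h'
      have := hprop k' List.mem_cons_self
      rw [this]; exact congrArg some (Option.some.inj h').symm ▸ rfl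
    · rw [PySem.Dict.get?_insert_of_ne _ _ hk] at h'
      exact hinv _ _ h'

-- B's first pass produces exactly the (split, iso) pairs of the relevant isos.
theorem pairs_spec (iso_dict : List (Int × List Int)) (eic : PySem.Dict Int (List Int)) (N : Nat) :
    ∀ (rest : List Int) (cache : PySem.Dict Int Int) (acc : List (Int × Int)),
    (∀ k w, cache.get? k = some w → findSplit N eic k = some w) →
    (∀ i ∈ rest, (iso_dict.lookup i).isSome = true → ∃ s, findSplit N eic i = some s) →
    (rest.foldl (fun (st : PySem.Dict Int Int × List (Int × Int)) iso =>
      if (iso_dict.lookup iso).isSome then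
        match walkSplit N eic st.1 [] iso with
        | none => st
        | some (s, path) => (path.foldl (fun c p => c.insert p s) st.1, st.2 ++ [(s, iso)])
      else st) (cache, acc)).2
    = acc ++ (rest.filter (fun i => (iso_dict.lookup i).isSome)).map
        (fun i => ((findSplit N eic i).getD 0, i)) := by
  intro rest
  induction rest with
  | nil => intro cache acc _ _; simp
  | cons iso t ih =>
    intro cache acc hinv htot
    simp only [List.foldl_cons, List.filter_cons]
    by_cases hl : (iso_dict.lookup iso).isSome
    · rw [if_pos hl]
      obtain ⟨s, hs⟩ := htot iso List.mem_cons_self hl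
      obtain ⟨tail, htail, hprop⟩ := walkSplit_spec eic N N le_rfl cache [] iso s hinv hs
      rw [htail]
      simp only [List.nil_append]
      rw [ih _ _ (cache_invariant_insert eic N s tail cache hinv hprop)
        (fun i hi => htot i (List.mem_cons_of_mem _ hi))]
      rw [if_pos (by simpa using hl)]
      simp [hs]
    · rw [if_neg hl, if_neg (by simpa using hl)]
      exact ih _ _ hinv (fun i hi => htot i (List.mem_cons_of_mem _ hi))

-- A's first loop is the pair-wise grouping fold applied to those same pairs.
theorem A_fold_pairs (iso_dict : List (Int × List Int)) (eic : PySem.Dict Int (List Int)) (N : Nat) :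
    ∀ (rest : List Int) (fsd : PySem.Dict Int (List Int)),
    (∀ i ∈ rest, (iso_dict.lookup i).isSome = true → ∃ s, findSplit N eic i = some s) →
    rest.foldl (fun (fsd : PySem.Dict Int (List Int)) iso =>
      if (iso_dict.lookup iso).isSome then
        match findSplit N eic iso with
        | none => fsd
        | some split =>
          if fsd.contains split then fsd.modify split [] (fun l => l ++ [iso])
          else fsd.insert split [split]
      else fsd) fsd
    = ((rest.filter (fun i => (iso_dict.lookup i).isSome)).map
        (fun i => ((findSplit N eic i).getD 0, i))).foldl
        (fun fsd p => if fsd.contains p.1 then fsd.modify p.1 [] (fun l => l ++ [p.2])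
          else fsd.insert p.1 [p.1]) fsd := by
  intro rest
  induction rest with
  | nil => intro fsd _; simp
  | cons iso t ih =>
    intro fsd htot
    simp only [List.foldl_cons, List.filter_cons]
    by_cases hl : (iso_dict.lookup iso).isSome
    · rw [if_pos hl, if_pos (by simpa using hl)]
      obtain ⟨s, hs⟩ := htot iso List.mem_cons_self hl
      simp only [hs, List.map_cons, List.foldl_cons, Option.getD_some]
      exact ih _ (fun i hi => htot i (List.mem_cons_of_mem _ hi))
    · rw [if_neg hl, if_neg (by simpa using hl)]
      exact ih _ (fun i hi => htot i (List.mem_cons_of_mem _ hi))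

theorem keys_stepA_fold :
    ∀ (pairs : List (Int × Int)) (d : PySem.Dict Int (List Int)),
    (pairs.foldl (fun fsd p => if fsd.contains p.1 then fsd.modify p.1 [] (fun l => l ++ [p.2])
      else fsd.insert p.1 [p.1]) d).keys = PySem.Set.update d.keys (pairs.map Prod.fst) := by
  intro pairs
  induction pairs with
  | nil => intro d; simp [PySem.Set.update]
  | cons p t ih =>
    intro d
    simp only [List.foldl_cons, List.map_cons]
    have hupd : PySem.Set.update d.keys (p.1 :: t.map Prod.fst)
        = PySem.Set.update (PySem.Set.add d.keys p.1) (t.map Prod.fst) := rfl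
    rw [hupd]
    by_cases hc : d.contains p.1
    · rw [if_pos hc, ih]
      congr 1
      rw [PySem.Dict.keys_modify, PySem.Dict.keys_insert_of_contains _ _ hc]
      have : p.1 ∈ d.keys := (PySem.Dict.contains_iff_mem_keys d p.1).mp hc
      simp [PySem.Set.add, PySem.Set.contains, this]
    · rw [if_neg hc, ih]
      congr 1
      have hcf : d.contains p.1 = false := by simpa using hc
      rw [PySem.Dict.keys_insert_of_not_contains _ _ hcf]
      have : p.1 ∉ d.keys := fun hm => by
        rw [(PySem.Dict.contains_iff_mem_keys d p.1).mpr hm] at hcf; cases hcf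
      simp [PySem.Set.add, PySem.Set.contains, this]

theorem getD_stepA_fold (s : Int) :
    ∀ (pairs : List (Int × Int)) (d : PySem.Dict Int (List Int)),
    (pairs.foldl (fun fsd p => if fsd.contains p.1 then fsd.modify p.1 [] (fun l => l ++ [p.2])
      else fsd.insert p.1 [p.1]) d).getD s []
    = if d.contains s then d.getD s [] ++ ((pairs.filter (fun p => p.1 == s)).map Prod.snd)
      else if s ∈ pairs.map Prod.fst then
        s :: ((pairs.filter (fun p => p.1 == s)).map Prod.snd).drop 1
      else [] := by
  intro pairs
  induction pairs with
  | nil =>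
    intro d
    by_cases hc : d.contains s
    · simp [hc]
    · simp [hc, PySem.Dict.getD_of_not_contains _ _ (by simpa using hc)]
  | cons p t ih =>
    intro d
    simp only [List.foldl_cons]
    by_cases hps : p.1 = s
    · subst hps
      by_cases hc : d.contains p.1
      · rw [if_pos hc, ih]
        have hc' : (d.modify p.1 [] (fun l => l ++ [p.2])).contains p.1 = true := by
          rw [PySem.Dict.contains_modify]; simp
        rw [if_pos hc', if_pos hc, PySem.Dict.getD_modify_self]
        simp
      · rw [if_neg hc, ih]
        have hc' : (d.insert p.1 [p.1]).contains p.1 = true := PySem.Dict.contains_insert_self d p.1 _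
        rw [if_pos hc', if_neg hc, PySem.Dict.getD_insert_self]
        simp
    · have hsp : s ≠ p.1 := fun h => hps h.symm
      have hflt : List.filter (fun q => q.1 == s) (p :: t) = List.filter (fun q => q.1 == s) t :=
        List.filter_cons_of_neg (by simp [hps])
      rw [hflt]
      by_cases hc : d.contains p.1
      · rw [if_pos hc, ih]
        have h1 : (d.modify p.1 [] (fun l => l ++ [p.2])).contains s = d.contains s := by
          rw [PySem.Dict.contains_modify]; simp [hsp]
        have h2 : (d.modify p.1 [] (fun l => l ++ [p.2])).getD s [] = d.getD s [] :=
          PySem.Dict.getD_modify_of_ne d _ _ hsp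
        rw [h1, h2]
        by_cases hcs : d.contains s
        · rw [if_pos hcs, if_pos hcs]
        · rw [if_neg hcs, if_neg hcs]
          by_cases hm : s ∈ List.map Prod.fst t
          · rw [if_pos hm, if_pos (by simp [hm])]
          · rw [if_neg hm, if_neg (by simp [hsp, hm])]
      · rw [if_neg hc, ih]
        have h1 : (d.insert p.1 [p.1]).contains s = d.contains s := by
          rw [PySem.Dict.contains_insert]; simp [hsp]
        have h2 : (d.insert p.1 [p.1]).getD s [] = d.getD s [] :=
          PySem.Dict.getD_insert_of_ne d _ _ hsp
        rw [h1, h2]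
        by_cases hcs : d.contains s
        · rw [if_pos hcs, if_pos hcs]
        · rw [if_neg hcs, if_neg hcs]
          by_cases hm : s ∈ List.map Prod.fst t
          · rw [if_pos hm, if_pos (by simp [hm])]
          · rw [if_neg hm, if_neg (by simp [hsp, hm])]

theorem inner_loop (iso_dict : List (Int × List Int)) (split : Int) :
    ∀ (members : List Int) (d : PySem.Dict Int (List Int)) (acc : List Int),
    members.foldl (fun ld subiso =>
      if (iso_dict.lookup subiso).isSome then
        ld.modify split [] (fun l => l ++ (iso_dict.lookup subiso).getD [])
      else ld) (d.insert split acc)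
    = d.insert split (acc ++ members.flatMap (fun sub => (iso_dict.lookup sub).getD [])) := by
  intro members
  induction members with
  | nil => intro d acc; simp
  | cons sub t ih =>
    intro d acc
    simp only [List.foldl_cons, List.flatMap_cons]
    by_cases hl : (iso_dict.lookup sub).isSome
    · rw [if_pos hl]
      rw [PySem.Dict.modify, PySem.Dict.getD_insert_self, PySem.Dict.insert_insert_self, ih]
      rw [List.append_assoc]
    · rw [if_neg hl, ih]
      have : (iso_dict.lookup sub).getD [] = [] := by
        cases h : iso_dict.lookup sub with
        | none => rfl
        | some v => rw [h] at hl; simp at hl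
      simp [this]

theorem fresh_insert_fold (cond : Int → Bool) (F : Int → List Int) :
    ∀ (l : List Int) (d : PySem.Dict Int (List Int)),
    (∀ k ∈ l, d.contains k = false) → l.Nodup →
    (l.foldl (fun ld k => if cond k then ld.insert k (F k) else ld) d).items
      = d.items ++ (l.filter cond).map (fun k => (k, F k)) := by
  intro l
  induction l with
  | nil => intro d _ _; simp
  | cons k t ih =>
    intro d hfresh hnd
    simp only [List.foldl_cons, List.filter_cons]
    by_cases hc : cond k
    · rw [if_pos hc, if_pos hc]
      rw [ih (d.insert k (F k)) ?_ hnd.of_cons]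
      · rw [PySem.Dict.items_insert_of_not_contains _ _ (hfresh k List.mem_cons_self)]
        simp
      · intro k' hk'
        rw [PySem.Dict.contains_insert]
        have hne : k' ≠ k := fun hkk => (List.nodup_cons.mp hnd).1 (hkk ▸ hk')
        simp [hne, hfresh k' (List.mem_cons_of_mem _ hk')]
    · rw [if_neg hc, if_neg (by simpa using hc)]
      exact ih d (fun k' hk' => hfresh k' (List.mem_cons_of_mem _ hk')) hnd.of_cons

theorem main_assembly (iso_dict : List (Int × List Int)) (iso_list : List Int) (eic_list : List (List Int))
    (hPre : ∀ iso ∈ iso_list, (iso_dict.lookup iso).isSome = true →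
      chainEnds (PySem.Dict.ofList (iso_list.zip eic_list)) (iso_list.length + 1) iso = true) :
    calc_leaf iso_dict iso_list eic_list = calc_leaf_alt iso_dict iso_list eic_list := by
  simp only [calc_leaf, calc_leaf_alt]
  set eic := PySem.Dict.ofList (iso_list.zip eic_list) with heic
  set N := iso_list.length + 1 with hN
  have htot : ∀ i ∈ iso_list, (iso_dict.lookup i).isSome = true → ∃ s, findSplit N eic i = some s :=
    fun i hi hrel => chainEnds_findSplit eic N i (hPre i hi hrel)
  set pairs := (iso_list.filter (fun i => (iso_dict.lookup i).isSome)).map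
      (fun i => ((findSplit N eic i).getD 0, i)) with hpairs
  -- B side: the first fold's pair list is `pairs`
  rw [pairs_spec iso_dict eic N iso_list PySem.Dict.empty []
        (fun k w h => by rw [PySem.Dict.get?_empty] at h; cases h) htot]
  simp only [List.nil_append]
  -- A side: the first fold is the grouping fold over `pairs`
  rw [A_fold_pairs iso_dict eic N iso_list PySem.Dict.empty htot]
  set G := pairs.foldl (fun fsd p => if fsd.contains p.1 then fsd.modify p.1 [] (fun l => l ++ [p.2])
      else fsd.insert p.1 [p.1]) PySem.Dict.empty with hG
  set groups := pairs.foldl (fun (g : PySem.Dict Int (List Int)) p =>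
      g.modify p.1 [] (fun l => l ++ [p.2])) PySem.Dict.empty with hgroups
  have hGkeys : G.keys = PySem.Set.update [] (pairs.map Prod.fst) := by
    rw [hG, keys_stepA_fold pairs PySem.Dict.empty, PySem.Dict.keys_empty]
  have hgkeys : groups.keys = PySem.Set.update [] (pairs.map Prod.fst) := by
    rw [hgroups, PySem.Dict.keys_foldl_modify_key pairs Prod.fst [] (fun _ p l => l ++ [p.2]),
        PySem.Dict.keys_empty]
  have hnd : groups.keys.Nodup :=
    PySem.Dict.nodup_keys_foldl_modify_key pairs Prod.fst [] (fun _ p l => l ++ [p.2])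
      PySem.Dict.empty PySem.Dict.nodup_keys_empty
  have hndG : G.keys.Nodup := by rw [hGkeys, ← hgkeys]; exact hnd
  -- rewrite A's second loop into a conditional fresh-insert fold
  rw [PySem.List.foldl_congr_mem G.keys _
      (fun ld k => if ((eic.getD k []).length == 0) then
          ld.insert k ((G.getD k []).flatMap (fun sub => (iso_dict.lookup sub).getD []))
        else ld) PySem.Dict.empty ?_]
  · rw [fresh_insert_fold _ _ G.keys PySem.Dict.empty
        (fun k _ => PySem.Dict.contains_empty k) hndG]
    rw [PySem.Dict.items_eq_map_keys groups hnd []]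
    rw [List.filter_map, List.map_map]
    simp only [show (PySem.Dict.empty : PySem.Dict Int (List Int)).items = [] from rfl, List.nil_append]
    rw [hGkeys, ← hgkeys]
    apply List.map_congr_left
    intro s hs
    have hskeys : s ∈ groups.keys := List.mem_of_mem_filter hs
    have hsmem : s ∈ pairs.map Prod.fst := by
      rw [hgkeys] at hskeys
      have := (PySem.Set.mem_update [] (pairs.map Prod.fst) s).mp hskeys
      simpa using this
    have hGval : G.getD s [] = s :: ((pairs.filter (fun p => p.1 == s)).map Prod.snd).drop 1 := by
      rw [hG, getD_stepA_fold s pairs PySem.Dict.empty, if_neg (by simp), if_pos hsmem]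
    have hgval : groups.getD s [] = (pairs.filter (fun p => p.1 == s)).map Prod.snd := by
      rw [hgroups, PySem.Dict.getD_foldl_modify_append pairs PySem.Dict.empty s,
          PySem.Dict.getD_empty]
      simp
    simp only [Function.comp, hGval, hgval, List.flatMap_cons]
  · intro ld k hk
    dsimp only
    by_cases hc : (eic.getD k []).length = 0
    · rw [if_pos hc, if_pos (by simpa using hc)]
      rw [inner_loop]
      simp
    · rw [if_neg hc, if_neg (by simpa using hc)]

-- ===== VERDICT (by name: the statement is the Claim_ definition above) =====
theorem calc_leaf_spec : Claim_equal_calc_leaf := by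
  intro iso_dict iso_list eic_list _ hPre
  show calc_leaf iso_dict iso_list eic_list = calc_leaf_alt iso_dict iso_list eic_list
  exact main_assembly iso_dict iso_list eic_list hPre
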